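-- pv_equiv track=rewrite | github.com/Maklowic/SPD_Laboratoria | Laby 8-9/Cw4_Greedy.py | Greedy
-- ===== SOURCE A (Python) =====
-- def Greedy(d):
--     n = len(d)
--     pi = []
--     tmp = d[:]
--     tmp.sort()
--     while tmp:
--         for k in range(0, n):
--             if tmp[0] == d[k]:
--                 pi.append(k+1)
--                 tmp.remove(d[k])
--                 if len(tmp) == 0:
--                     return pi
-- ===== SOURCE B (Python) =====
-- def Greedy(d):
--     # Bucket 1-based positions by value, then walk the distinct values in
--     # sorted order, emitting each bucket rotated at the running cursor
--     # (positions after the cursor first, then the wrapped-around ones).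
--     buckets = {}
--     for i, v in enumerate(d):
--         buckets.setdefault(v, []).append(i + 1)
--     pi = []
--     cursor = 0
--     for v in sorted(buckets):
--         I = buckets[v]
--         part1 = [p for p in I if p > cursor]
--         part2 = [p for p in I if p <= cursor]
--         pi.extend(part1)
--         pi.extend(part2)
--         cursor = (part2 or part1)[-1]
--     return pi
-- ===== Notes on version B (the rewrite author's own statement) =====
-- stated objective: faster
-- what changed: Replaces the repeated full-array scans over a shrinking sorted copy with a single bucketing pass (value -> list of 1-based positions) followed by one walk over the sorted distinct values, emitting each bucket rotated at the running cursor (positions after the cursor first, then the wrapped-around ones), which reproduces A's scan order exactly.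
-- outside the precondition, e.g. on Greedy([]): A returns None, B returns []
import Mathlib
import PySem

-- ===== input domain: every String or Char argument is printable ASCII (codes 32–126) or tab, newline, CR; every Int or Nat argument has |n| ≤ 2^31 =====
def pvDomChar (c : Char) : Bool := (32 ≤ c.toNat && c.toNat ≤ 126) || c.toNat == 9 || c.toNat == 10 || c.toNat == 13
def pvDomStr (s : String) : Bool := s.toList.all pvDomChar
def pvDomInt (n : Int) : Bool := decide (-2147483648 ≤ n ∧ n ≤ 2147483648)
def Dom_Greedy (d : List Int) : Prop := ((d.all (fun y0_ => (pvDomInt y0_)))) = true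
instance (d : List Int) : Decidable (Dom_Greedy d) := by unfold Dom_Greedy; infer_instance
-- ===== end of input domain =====

-- B buckets the 1-based positions by value and walks the sorted distinct values once with a
-- rotating cursor, instead of A's repeated full scans over a shrinking sorted copy.

-- ===== PORT A =====
-- inner 'for k in range(0, n)' loop; returns (tmp, pi, early-return value if the 'return pi' fired)
def greedyPass (d : List Int) (n : Nat) (k : Nat) (tmp : List Int) (pi : List Int) :
    List Int × List Int × Option (List Int) :=
  if _h : k < n then
    match PySem.List.pyGet? tmp 0, PySem.List.pyGet? d (k : Int) with
    | some t0, some dk =>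
      if t0 = dk then
        let pi' := pi ++ [(k : Int) + 1]
        let tmp' := (PySem.List.remove? tmp dk).getD tmp
        if tmp'.length = 0 then (tmp', pi', some pi')
        else greedyPass d n (k + 1) tmp' pi'
      else greedyPass d n (k + 1) tmp pi
    | _, _ => (tmp, pi, none)   -- IndexError; unreachable: tmp is nonempty and k < n = len(d)
  else (tmp, pi, none)
termination_by n - k

-- 'while tmp:' loop; fuel = one unit per pass (each pass removes at least one element)
def greedyWhile (d : List Int) (n : Nat) : Nat → List Int → List Int → List Int
  | 0, _, pi => pi
  | fuel + 1, tmp, pi =>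
    if tmp = [] then pi   -- Python falls off the while and returns None; reachable only for d = []
    else
      match greedyPass d n 0 tmp pi with
      | (_, _, some r) => r
      | (tmp', pi', none) => greedyWhile d n fuel tmp' pi'

def Greedy (d : List Int) : List Int :=
  let n := d.length
  let tmp := PySem.List.sorted d (fun x => x) false
  greedyWhile d n (tmp.length + 1) tmp []

-- ===== PORT B =====
def Greedy_alt (d : List Int) : List Int :=
  let buckets := (PySem.List.enumerate d 0).foldl
      (fun bk p => bk.modify p.2 [] (fun l => l ++ [p.1 + 1])) PySem.Dict.empty
  let keysSorted := PySem.List.sorted (PySem.Dict.keys buckets) (fun x => x) false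
  let res := keysSorted.foldl (fun (acc : List Int × Int) v =>
      let I := PySem.Dict.getD buckets v []
      let part1 := I.filter (fun p => decide (acc.2 < p))
      let part2 := I.filter (fun p => decide (p ≤ acc.2))
      let chosen := if part2.isEmpty then part1 else part2
      (acc.1 ++ part1 ++ part2, (PySem.List.pyGet? chosen (-1)).getD acc.2))
    ([], 0)
  res.1

-- ===== PRECONDITION & SPEC =====
-- Pre_ excludes only the empty list, on which A falls off its while loop and returns None (not a list).
def Pre_Greedy (d : List Int) : Prop := d ≠ []
instance (d : List Int) : Decidable (Pre_Greedy d) := by unfold Pre_Greedy; infer_instance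
def pvWitness_Greedy : List Int := [2, 1, 2]

def Spec_Greedy (d : List Int) (out : List Int) : Prop := out = Greedy_alt d
instance (d : List Int) (out : List Int) : Decidable (Spec_Greedy d out) := by unfold Spec_Greedy; infer_instance

-- ===== CLAIM (what is proved, stated in full; the proofs are below) =====
def Claim_equal_Greedy : Prop := ∀ (d : List Int), Dom_Greedy d → Pre_Greedy d → Spec_Greedy d (Greedy d)

-- ===== LEMMAS AND PROOFS =====

-- 1-based positions (as Int) of value v in d at 0-based indices ≥ k, in increasing order
def posFrom (d : List Int) (k : Nat) (v : Int) : List Int :=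
  if h : k < d.length then
    (if d[k] = v then ((k : Int) + 1) :: posFrom d (k + 1) v else posFrom d (k + 1) v)
  else []
termination_by d.length - k

-- last element of l (as a Nat) or the default k
def lastD (l : List Int) (k : Nat) : Nat := l.foldl (fun _ p => p.toNat) k

-- the emission sequence of A: consume tmp front-to-back, scanning d from k, wrapping to 0
def emitSeq (d : List Int) : List Int → Nat → List Int
  | [], _ => []
  | v :: rest, k =>
    match (posFrom d k v).head? with
    | some p => p :: emitSeq d rest p.toNat
    | none =>
      match (posFrom d 0 v).head? with
      | some p => p :: emitSeq d rest p.toNat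
      | none => []

-- what one pass (from scan position k) emits, and the tmp it leaves
def passEmit (d : List Int) : Nat → List Int → List Int × List Int
  | _, [] => ([], [])
  | k, v :: rest =>
    match (posFrom d k v).head? with
    | some p => let r := passEmit d p.toNat rest; (p :: r.1, r.2)
    | none => ([], v :: rest)

-- B's step with the bucket replaced by posFrom
def stepP (d : List Int) (acc : List Int × Int) (v : Int) : List Int × Int :=
  let I := posFrom d 0 v
  let part1 := I.filter (fun p => decide (acc.2 < p))
  let part2 := I.filter (fun p => decide (p ≤ acc.2))
  let chosen := if part2.isEmpty then part1 else part2
  (acc.1 ++ part1 ++ part2, (PySem.List.pyGet? chosen (-1)).getD acc.2)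

lemma posFrom_lt {d : List Int} {k : Nat} (v : Int) (h : k < d.length) :
    posFrom d k v = if d[k] = v then ((k : Int) + 1) :: posFrom d (k + 1) v else posFrom d (k + 1) v := by
  rw [posFrom]; simp [h]

lemma posFrom_ge {d : List Int} {k : Nat} (v : Int) (h : ¬ k < d.length) :
    posFrom d k v = [] := by
  rw [posFrom]; simp [h]

lemma posFrom_mem {d : List Int} {v p : Int} : ∀ {k : Nat}, p ∈ posFrom d k v → (k : Int) < p := by
  suffices h : ∀ n k, d.length - k ≤ n → p ∈ posFrom d k v → (k : Int) < p from
    fun {k} hk => h (d.length - k) k le_rfl hk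
  intro n
  induction n with
  | zero =>
    intro k hk hp
    rw [posFrom_ge v (by omega)] at hp
    simp at hp
  | succ n ih =>
    intro k hk hp
    by_cases hlt : k < d.length
    · rw [posFrom_lt v hlt] at hp
      split_ifs at hp with hv
      · rcases List.mem_cons.mp hp with h1 | h1
        · omega
        · have := ih (k + 1) (by omega) h1
          push_cast at this ⊢
          omega
      · have := ih (k + 1) (by omega) hp
        push_cast at this ⊢
        omega
    · rw [posFrom_ge v hlt] at hp
      simp at hp

lemma posFrom_pairwise (d : List Int) (k : Nat) (v : Int) : (posFrom d k v).Pairwise (· < ·) := by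
  suffices h : ∀ n k, d.length - k ≤ n → (posFrom d k v).Pairwise (· < ·) from h (d.length - k) k le_rfl
  intro n
  induction n with
  | zero =>
    intro k hk
    rw [posFrom_ge v (by omega)]
    exact List.Pairwise.nil
  | succ n ih =>
    intro k hk
    by_cases hlt : k < d.length
    · rw [posFrom_lt v hlt]
      split_ifs with hv
      · refine List.Pairwise.cons ?_ (ih (k + 1) (by omega))
        intro q hq
        have := posFrom_mem hq
        push_cast at this ⊢
        omega
      · exact ih (k + 1) (by omega)
    · rw [posFrom_ge v hlt]
      exact List.Pairwise.nil

lemma posFrom_succ (d : List Int) (k : Nat) (v : Int) :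
    posFrom d (k + 1) v = (posFrom d k v).filter (fun p => decide (((k : Int) + 1) < p)) := by
  have hself : (posFrom d (k + 1) v).filter (fun p => decide (((k : Int) + 1) < p)) = posFrom d (k + 1) v := by
    refine List.filter_eq_self.mpr ?_
    intro q hq
    have := posFrom_mem hq
    push_cast at this
    simpa using by omega
  by_cases hlt : k < d.length
  · rw [posFrom_lt v hlt]
    split_ifs with hv
    · rw [List.filter_cons]
      simp only [show (decide (((k : Int) + 1) < (k : Int) + 1)) = false by simp,
        Bool.false_eq_true, if_false]
      rw [hself]
    · rw [hself]
  · rw [posFrom_ge v hlt, posFrom_ge v (by omega)]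
    simp

lemma posFrom_filter (d : List Int) (v : Int) {j k : Nat} (h : j ≤ k) :
    posFrom d k v = (posFrom d j v).filter (fun p => decide ((k : Int) < p)) := by
  induction k, h using Nat.le_induction with
  | base =>
    refine (List.filter_eq_self.mpr ?_).symm
    intro q hq
    simpa using posFrom_mem hq
  | succ k hk ih =>
    rw [posFrom_succ d k v, ih, List.filter_filter]
    refine List.filter_congr ?_
    intro p _
    have : ((((k : Int) + 1) < p) ∧ ((k : Int) < p)) ↔ (((k + 1 : Nat) : Int) < p) := by
      push_cast; omega
    calc (decide (((k : Int) + 1) < p) && decide ((k : Int) < p))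
        = decide ((((k : Int) + 1) < p) ∧ ((k : Int) < p)) := by simp
      _ = decide (((k + 1 : Nat) : Int) < p) := by rw [decide_eq_decide]; exact this

lemma posFrom_length (d : List Int) (v : Int) : ∀ k, (posFrom d k v).length = (d.drop k).count v := by
  suffices h : ∀ n k, d.length - k ≤ n → (posFrom d k v).length = (d.drop k).count v from
    fun k => h (d.length - k) k le_rfl
  intro n
  induction n with
  | zero =>
    intro k hk
    rw [posFrom_ge v (by omega), List.drop_eq_nil_of_le (by omega)]
    simp
  | succ n ih =>
    intro k hk
    by_cases hlt : k < d.length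
    · rw [posFrom_lt v hlt, ← List.getElem_cons_drop (as := d) (h := hlt), List.count_cons]
      simp only [beq_iff_eq]
      split_ifs with hv <;> simp [ih (k + 1) (by omega)]
    · rw [posFrom_ge v hlt, List.drop_eq_nil_of_le (by omega)]
      simp

lemma posFrom_zero_length (d : List Int) (v : Int) : (posFrom d 0 v).length = d.count v := by
  simpa using posFrom_length d v 0

lemma lastD_cons (p : Int) (l : List Int) (k : Nat) : lastD (p :: l) k = lastD l p.toNat := rfl

lemma lastD_irrel {l : List Int} (h : l ≠ []) (a b : Nat) : lastD l a = lastD l b := by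
  cases l with
  | nil => exact absurd rfl h
  | cons p t => rfl

lemma lastD_cast {l : List Int} (hpos : ∀ p ∈ l, 0 < p) (h : l ≠ []) (a : Nat) :
    ((lastD l a : Nat) : Int) = l.getLast h := by
  induction l generalizing a with
  | nil => exact absurd rfl h
  | cons p t ih =>
    cases t with
    | nil =>
      show ((p.toNat : Nat) : Int) = p
      exact Int.toNat_of_nonneg (le_of_lt (hpos p (by simp)))
    | cons q t' =>
      rw [lastD_cons, List.getLast_cons (by simp)]
      exact ih (fun x hx => hpos x (List.mem_cons_of_mem p hx)) (by simp) p.toNat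

-- ===== A-side =====

lemma pass_eq (d : List Int) : ∀ (k : Nat) (v : Int) (rest pi : List Int),
    greedyPass d d.length k (v :: rest) pi =
      ((passEmit d k (v :: rest)).2, pi ++ (passEmit d k (v :: rest)).1,
       if (passEmit d k (v :: rest)).2 = [] then some (pi ++ (passEmit d k (v :: rest)).1) else none) := by
  suffices h : ∀ n k, d.length - k ≤ n → ∀ (v : Int) (rest pi : List Int),
      greedyPass d d.length k (v :: rest) pi =
        ((passEmit d k (v :: rest)).2, pi ++ (passEmit d k (v :: rest)).1,
         if (passEmit d k (v :: rest)).2 = [] then some (pi ++ (passEmit d k (v :: rest)).1) else none) from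
    fun k => h (d.length - k) k le_rfl
  intro n
  induction n with
  | zero =>
    intro k hk v rest pi
    have hge : ¬ k < d.length := by omega
    rw [greedyPass, passEmit]
    simp [hge, posFrom_ge v hge]
  | succ n ih =>
    intro k hk v rest pi
    by_cases hlt : k < d.length
    · rw [greedyPass]
      simp only [hlt, dif_pos, PySem.List.pyGet?_zero_cons, PySem.List.pyGet?_natCast,
        List.getElem?_eq_getElem hlt]
      by_cases hv : v = d[k]
      · have hdk : d[k] = v := hv.symm
        have hpf : posFrom d k v = ((k : Int) + 1) :: posFrom d (k + 1) v := by
          rw [posFrom_lt v hlt, if_pos hdk]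
        have htn : ((k : Int) + 1).toNat = k + 1 := by omega
        rw [passEmit]
        simp only [hpf, List.head?_cons, htn]
        have hrm : (PySem.List.remove? (v :: rest) d[k]).getD (v :: rest) = rest := by
          rw [hdk, PySem.List.remove?_cons_self]
          rfl
        simp only [if_pos hv, hrm]
        cases rest with
        | nil =>
          rw [passEmit]
          simp
        | cons w rest' =>
          simp only [List.length_cons, Nat.succ_ne_zero, if_false]
          rw [ih (k + 1) (by omega) w rest' (pi ++ [(k : Int) + 1])]
          simp
      · have hdk : ¬ d[k] = v := fun h => hv h.symm
        have hpf : posFrom d k v = posFrom d (k + 1) v := by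
          rw [posFrom_lt v hlt, if_neg hdk]
        rw [if_neg hv, ih (k + 1) (by omega) v rest pi]
        have : passEmit d k (v :: rest) = passEmit d (k + 1) (v :: rest) := by
          rw [passEmit, passEmit, hpf]
        rw [this]
    · rw [greedyPass, passEmit]
      simp [hlt, posFrom_ge v hlt]

lemma passEmit_mem (d : List Int) : ∀ (tmp : List Int) (k : Nat) (x : Int),
    x ∈ (passEmit d k tmp).2 → x ∈ tmp := by
  intro tmp
  induction tmp with
  | nil => intro k x hx; rw [passEmit] at hx; simp at hx
  | cons v rest ih =>
    intro k x hx
    rw [passEmit] at hx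
    cases hh : (posFrom d k v).head? with
    | some p =>
      simp only [hh] at hx
      exact List.mem_cons_of_mem v (ih p.toNat x hx)
    | none => simpa [hh] using hx

lemma passEmit_len (d : List Int) : ∀ (tmp : List Int) (k : Nat),
    (passEmit d k tmp).2.length ≤ tmp.length := by
  intro tmp
  induction tmp with
  | nil => intro k; simp [passEmit]
  | cons v rest ih =>
    intro k
    rw [passEmit]
    cases (posFrom d k v).head? with
    | some p => exact le_trans (ih p.toNat) (by simp)
    | none => simp

lemma emitSeq_pass (d : List Int) : ∀ (tmp : List Int) (k : Nat),
    emitSeq d tmp k = (passEmit d k tmp).1 ++ emitSeq d (passEmit d k tmp).2 0 := by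
  intro tmp
  induction tmp with
  | nil => intro k; rw [passEmit, emitSeq]; simp [emitSeq]
  | cons v rest ih =>
    intro k
    rw [passEmit, emitSeq]
    cases (posFrom d k v).head? with
    | some p => simp only [List.cons_append]; rw [ih p.toNat]
    | none =>
      simp only []
      cases hh0 : (posFrom d 0 v).head? with
      | some p =>
        rw [emitSeq]
        simp only [hh0, List.nil_append]
      | none =>
        rw [emitSeq]
        simp only [hh0, List.nil_append]

lemma while_eq (d : List Int) : ∀ (fuel : Nat) (tmp pi : List Int),
    tmp.length ≤ fuel → (∀ x ∈ tmp, x ∈ d) →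
    greedyWhile d d.length fuel tmp pi = pi ++ emitSeq d tmp 0 := by
  intro fuel
  induction fuel with
  | zero =>
    intro tmp pi hlen _
    have : tmp = [] := List.length_eq_zero_iff.mp (by omega)
    subst this
    rw [greedyWhile, emitSeq]
    simp
  | succ fuel ih =>
    intro tmp pi hlen hmem
    cases tmp with
    | nil =>
      rw [greedyWhile, emitSeq]
      simp
    | cons v rest =>
      rw [greedyWhile]
      rw [if_neg (by simp : ¬ (v :: rest) = [])]
      rw [pass_eq d 0 v rest pi]
      have hv : v ∈ d := hmem v (by simp)
      have hne : posFrom d 0 v ≠ [] := by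
        intro h
        have h2 := posFrom_zero_length d v
        rw [h] at h2
        have h3 := List.count_pos_iff.mpr hv
        simp only [List.length_nil] at h2
        omega
      obtain ⟨p, ps, hps⟩ := List.exists_cons_of_ne_nil hne
      have hh : (posFrom d 0 v).head? = some p := by rw [hps]; rfl
      have hpe : passEmit d 0 (v :: rest) =
          (p :: (passEmit d p.toNat rest).1, (passEmit d p.toNat rest).2) := by
        rw [passEmit, hh]
      by_cases hr : (passEmit d 0 (v :: rest)).2 = []
      · simp only [hr, if_pos]
        rw [emitSeq_pass d (v :: rest) 0, hr, emitSeq]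
        simp
      · rw [if_neg hr]
        show greedyWhile d d.length fuel (passEmit d 0 (v :: rest)).2
          (pi ++ (passEmit d 0 (v :: rest)).1) = _
        have hlen2 : (passEmit d 0 (v :: rest)).2.length ≤ fuel := by
          have h1 : (passEmit d p.toNat rest).2.length ≤ rest.length := passEmit_len d rest p.toNat
          rw [hpe]
          show (passEmit d p.toNat rest).2.length ≤ fuel
          simp only [List.length_cons] at hlen
          omega
        have hmem2 : ∀ x ∈ (passEmit d 0 (v :: rest)).2, x ∈ d :=
          fun x hx => hmem x (passEmit_mem d (v :: rest) 0 x hx)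
        rw [ih _ _ hlen2 hmem2, emitSeq_pass d (v :: rest) 0]
        simp

lemma A_eq (d : List Int) :
    Greedy d = emitSeq d (PySem.List.sorted d (fun x => x) false) 0 := by
  show greedyWhile d d.length ((PySem.List.sorted d (fun x => x) false).length + 1)
      (PySem.List.sorted d (fun x => x) false) [] = _
  rw [while_eq d _ _ [] (by omega) (fun x hx => (PySem.List.mem_sorted _ _ _ _).mp hx)]
  simp

-- ===== B-side =====

lemma asc (d : List Int) (v : Int) : ∀ (m k : Nat) (rest : List Int), m ≤ (posFrom d k v).length →
    emitSeq d (List.replicate m v ++ rest) k =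
      (posFrom d k v).take m ++ emitSeq d rest (lastD ((posFrom d k v).take m) k)
    ∧ posFrom d (lastD ((posFrom d k v).take m) k) v = (posFrom d k v).drop m := by
  intro m
  induction m with
  | zero =>
    intro k rest _
    simp [lastD]
  | succ m ih =>
    intro k rest hm
    obtain ⟨p, ps, hps⟩ : ∃ p ps, posFrom d k v = p :: ps := by
      cases h : posFrom d k v with
      | nil => rw [h] at hm; simp at hm
      | cons p ps => exact ⟨p, ps, rfl⟩
    have hkp : (k : Int) < p := posFrom_mem (by rw [hps]; simp)
    have hcast : ((p.toNat : Nat) : Int) = p := Int.toNat_of_nonneg (by omega)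
    have hkle : k ≤ p.toNat := by omega
    have hnext : posFrom d p.toNat v = ps := by
      rw [posFrom_filter d v hkle, hps, List.filter_cons]
      have hpp : (decide ((p.toNat : Int) < p)) = false := by simp [hcast]
      simp only [hpp, Bool.false_eq_true, if_false]
      refine List.filter_eq_self.mpr ?_
      intro q hq
      have hpq : p < q := by
        have := posFrom_pairwise d k v
        rw [hps] at this
        exact (List.pairwise_cons.mp this).1 q hq
      simp [hcast]
      omega
    have hm' : m ≤ (posFrom d p.toNat v).length := by
      rw [hnext]
      rw [hps] at hm
      simpa using hm
    obtain ⟨ih1, ih2⟩ := ih p.toNat rest hm'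
    constructor
    · show emitSeq d (v :: (List.replicate m v ++ rest)) k = _
      rw [emitSeq]
      simp only [hps, List.head?_cons]
      rw [ih1, hnext]
      simp [List.take_succ_cons, lastD_cons]
    · rw [hps, List.take_succ_cons, List.drop_succ_cons, lastD_cons, ← hnext, ih2, hnext]

lemma wrap (d : List Int) (v : Int) {k : Nat} (h : posFrom d k v = []) (zs : List Int) :
    emitSeq d (v :: zs) k = emitSeq d (v :: zs) 0 := by
  rw [emitSeq, emitSeq, h]
  cases (posFrom d 0 v).head? with
  | some p => simp
  | none => simp

lemma filter_le_append_filter_gt {l : List Int} (c : Int) (h : l.Pairwise (· < ·)) :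
    l.filter (fun p => decide (p ≤ c)) ++ l.filter (fun p => decide (c < p)) = l := by
  induction l with
  | nil => simp
  | cons p t ih =>
    obtain ⟨hall, htail⟩ := List.pairwise_cons.mp h
    by_cases hpc : p ≤ c
    · simp only [List.filter_cons, decide_eq_true hpc,
        show (decide (c < p)) = false by simp; omega, Bool.false_eq_true, if_false, if_true]
      rw [List.cons_append, ih htail]
    · have h1 : t.filter (fun p => decide (p ≤ c)) = [] := by
        refine List.filter_eq_nil_iff.mpr ?_
        intro q hq
        have := hall q hq
        simp
        omega
      have h2 : t.filter (fun p => decide (c < p)) = t := by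
        refine List.filter_eq_self.mpr ?_
        intro q hq
        have := hall q hq
        simp
        omega
      simp only [List.filter_cons, show (decide (p ≤ c)) = false by simp; omega,
        show (decide (c < p)) = true by simp; omega, Bool.false_eq_true, if_false, if_true,
        h1, h2, List.nil_append]

lemma group (d : List Int) (v : Int) (k : Nat) (rest : List Int) :
    emitSeq d (List.replicate (d.count v) v ++ rest) k =
      posFrom d k v ++ (posFrom d 0 v).filter (fun p => decide (p ≤ (k : Int))) ++
        emitSeq d rest
          (lastD ((posFrom d 0 v).filter (fun p => decide (p ≤ (k : Int))))
                 (lastD (posFrom d k v) k)) := by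
  set I := posFrom d 0 v with hI
  set P1 := posFrom d k v with hP1
  set P2 := I.filter (fun p => decide (p ≤ (k : Int))) with hP2
  have hsplit : P2 ++ P1 = I := by
    rw [hP1, posFrom_filter d v (Nat.zero_le k), ← hI]
    exact filter_le_append_filter_gt (k : Int) (posFrom_pairwise d 0 v)
  have hlen : P2.length + P1.length = I.length := by
    rw [← hsplit]; simp
  have hcnt : I.length = d.count v := posFrom_zero_length d v
  have hm : d.count v = P1.length + P2.length := by omega
  rw [hm, List.replicate_add, List.append_assoc]
  have h1 := asc d v P1.length k (List.replicate P2.length v ++ rest) (by rw [← hP1])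
  rw [← hP1, List.take_length] at h1
  obtain ⟨h1a, h1b⟩ := h1
  rw [h1a]
  rw [List.drop_length] at h1b
  set c1 := lastD P1 k with hc1
  rcases Nat.eq_zero_or_pos P2.length with h2z | h2p
  · have hP2nil : P2 = [] := List.length_eq_zero_iff.mp h2z
    rw [hP2nil]
    simp [lastD]
  · have hP2ne : P2 ≠ [] := by
      intro h; rw [h] at h2p; simp at h2p
    obtain ⟨q, qs, hqs⟩ := List.exists_cons_of_ne_nil hP2ne
    have hrepl : List.replicate P2.length v ++ rest = v :: (List.replicate (P2.length - 1) v ++ rest) := by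
      cases hh : P2.length with
      | zero => omega
      | succ nn => simp [List.replicate_succ]
    rw [hrepl, wrap d v h1b, ← hrepl]
    have h2 := asc d v P2.length 0 rest (by rw [← hI]; omega)
    rw [← hI] at h2
    have htake : I.take P2.length = P2 := by
      rw [← hsplit, List.take_left]
    rw [htake] at h2
    obtain ⟨h2a, _⟩ := h2
    rw [h2a, List.append_assoc]
    congr 2
    rw [lastD_irrel hP2ne 0 c1]

lemma main_fold (d : List Int) : ∀ (S : List Int) (acc : List Int) (k : Nat),
    (∀ v ∈ S, v ∈ d) →
    (S.foldl (stepP d) (acc, (k : Int))).1 =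
      acc ++ emitSeq d (S.flatMap (fun v => List.replicate (d.count v) v)) k := by
  intro S
  induction S with
  | nil =>
    intro acc k _
    simp [emitSeq]
  | cons v S' ih =>
    intro acc k hmem
    have hv : v ∈ d := hmem v (by simp)
    set P1 := posFrom d k v with hP1
    set P2 := (posFrom d 0 v).filter (fun p => decide (p ≤ (k : Int))) with hP2
    have hpos : ∀ p ∈ posFrom d 0 v, 0 < p := by
      intro p hp
      have := posFrom_mem hp
      simpa using this
    have hIne : posFrom d 0 v ≠ [] := by
      intro h
      have h2 := posFrom_zero_length d v
      rw [h] at h2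
      have h3 := List.count_pos_iff.mpr hv
      simp only [List.length_nil] at h2
      omega
    have hfilt : (posFrom d 0 v).filter (fun p => decide ((k : Int) < p)) = P1 :=
      (posFrom_filter d v (Nat.zero_le k)).symm
    set k' := lastD P2 (lastD P1 k) with hk'
    have hstep : stepP d (acc, (k : Int)) v = (acc ++ P1 ++ P2, (k' : Int)) := by
      unfold stepP
      simp only [hfilt, ← hP2]
      refine Prod.ext rfl ?_
      show (PySem.List.pyGet? (if P2.isEmpty then P1 else P2) (-1)).getD (k : Int) = (k' : Int)
      by_cases h2 : P2 = []
      · have h1 : P1 ≠ [] := by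
          intro h
          apply hIne
          rw [← filter_le_append_filter_gt (k : Int) (posFrom_pairwise d 0 v), hfilt, ← hP2, h2, h]
          rfl
        rw [h2]
        simp only [List.isEmpty_nil, if_true]
        rw [PySem.List.pyGet?_neg_one, List.getLast?_eq_some_getLast h1]
        rw [hk', h2]
        show _ = ((lastD P1 k : Nat) : Int)
        rw [lastD_cast (fun p hp => hpos p (by rw [← hfilt] at hp; exact List.mem_of_mem_filter hp)) h1 k]
        rfl
      · have h2e : P2.isEmpty = false := by simpa using h2
        simp only [h2e, Bool.false_eq_true, if_false]
        rw [PySem.List.pyGet?_neg_one, List.getLast?_eq_some_getLast h2]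
        rw [hk']
        rw [lastD_cast (fun p hp => hpos p (List.mem_of_mem_filter hp)) h2 (lastD P1 k)]
        rfl
    show ((S').foldl (stepP d) (stepP d (acc, (k : Int)) v)).1 = _
    rw [hstep, ih (acc ++ P1 ++ P2) k' (fun w hw => hmem w (List.mem_cons_of_mem v hw))]
    rw [List.flatMap_cons, group d v k (S'.flatMap (fun w => List.replicate (d.count w) w))]
    simp only [← hP1, ← hP2, ← hk', List.append_assoc]

lemma enum_pos (d : List Int) (v : Int) : ∀ k,
    ((PySem.List.enumerate (d.drop k) (k : Int)).filter (fun p => p.2 == v)).map (fun p => p.1 + 1)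
      = posFrom d k v := by
  suffices h : ∀ n k, d.length - k ≤ n →
      ((PySem.List.enumerate (d.drop k) (k : Int)).filter (fun p => p.2 == v)).map (fun p => p.1 + 1)
        = posFrom d k v from fun k => h (d.length - k) k le_rfl
  intro n
  induction n with
  | zero =>
    intro k hk
    rw [posFrom_ge v (by omega), List.drop_eq_nil_of_le (by omega)]
    simp [PySem.List.enumerate_nil]
  | succ n ih =>
    intro k hk
    by_cases hlt : k < d.length
    · rw [posFrom_lt v hlt, ← List.getElem_cons_drop (as := d) (h := hlt),
        PySem.List.enumerate_cons, List.filter_cons]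
      have hsucc : ((k : Int) + 1) = (((k + 1 : Nat)) : Int) := by push_cast; ring
      by_cases hv : d[k] = v
      · simp only [hv, if_pos, beq_self_eq_true, List.map_cons]
        rw [hsucc, ih (k + 1) (by omega)]
      · have : (d[k] == v) = false := by simpa using hv
        simp only [this, Bool.false_eq_true, if_false, hv]
        rw [hsucc, ih (k + 1) (by omega)]
    · rw [posFrom_ge v hlt, List.drop_eq_nil_of_le (by omega)]
      simp [PySem.List.enumerate_nil]

lemma bucket_eq (d : List Int) (v : Int) :
    ((PySem.List.enumerate d 0).foldl
      (fun bk p => bk.modify p.2 [] (fun l => l ++ [p.1 + 1])) PySem.Dict.empty).getD v []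
    = posFrom d 0 v := by
  have hmap : (PySem.List.enumerate d 0).foldl
      (fun bk p => bk.modify p.2 [] (fun l => l ++ [p.1 + 1])) PySem.Dict.empty
      = ((PySem.List.enumerate d 0).map (fun p => (p.2, p.1 + 1))).foldl
          (fun bk q => bk.modify q.1 [] (fun l => l ++ [q.2])) PySem.Dict.empty := by
    rw [List.foldl_map]
  rw [hmap, PySem.Dict.getD_foldl_modify_append, PySem.Dict.getD_empty, List.nil_append]
  rw [List.filter_map, List.map_map]
  have := enum_pos d v 0
  rw [List.drop_zero] at this
  rw [show ((0 : Nat) : Int) = 0 from rfl] at this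
  rw [← this]
  rfl

lemma keys_eq (d : List Int) :
    ((PySem.List.enumerate d 0).foldl
      (fun bk p => bk.modify p.2 [] (fun l => l ++ [p.1 + 1])) PySem.Dict.empty).keys
    = PySem.Set.ofList d := by
  rw [PySem.Dict.keys_foldl_modify_key]
  rw [PySem.Dict.keys_empty, PySem.List.map_snd_enumerate, PySem.Set.update_nil_left]

lemma count_flat (d : List Int) : ∀ (S : List Int), S.Nodup → ∀ a : Int,
    (S.flatMap (fun v => List.replicate (d.count v) v)).count a = if a ∈ S then d.count a else 0 := by
  intro S
  induction S with
  | nil => intro _ a; simp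
  | cons v S' ih =>
    intro hnd a
    obtain ⟨hnv, hnd'⟩ := List.nodup_cons.mp hnd
    rw [List.flatMap_cons, List.count_append, ih hnd' a]
    by_cases hav : a = v
    · subst hav
      simp [hnv]
    · have hva : ¬ v = a := fun h => hav h.symm
      by_cases haS : a ∈ S' <;> simp [List.count_replicate, haS, hav, hva]

lemma flat_pairwise (d : List Int) : ∀ (S : List Int), S.Pairwise (· < ·) →
    (S.flatMap (fun v => List.replicate (d.count v) v)).Pairwise (· ≤ ·) := by
  intro S
  induction S with
  | nil => intro _; simp
  | cons v S' ih =>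
    intro hp
    obtain ⟨hall, htail⟩ := List.pairwise_cons.mp hp
    rw [List.flatMap_cons]
    refine List.pairwise_append.mpr ⟨?_, ih htail, ?_⟩
    · exact List.pairwise_replicate.mpr (Or.inr le_rfl)
    · intro x hx y hy
      have hxv : x = v := List.eq_of_mem_replicate hx
      obtain ⟨w, hw, hyw⟩ := List.mem_flatMap.mp hy
      have hyw' : y = w := List.eq_of_mem_replicate hyw
      rw [hxv, hyw']
      exact le_of_lt (hall w hw)

lemma sorted_eq_flat (d : List Int) :
    PySem.List.sorted d (fun x => x) false =
      (PySem.List.sorted (PySem.Set.ofList d) (fun x => x) false).flatMap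
        (fun v => List.replicate (d.count v) v) := by
  set S := PySem.List.sorted (PySem.Set.ofList d) (fun x => x) false with hS
  have hSnd : S.Nodup := by
    rw [hS]
    exact (PySem.List.sorted_perm (PySem.Set.ofList d) (fun x => x) false).nodup_iff.mpr
      (PySem.Set.nodup_ofList d)
  have hSmem : ∀ a : Int, a ∈ S ↔ a ∈ d := by
    intro a
    rw [hS, PySem.List.mem_sorted, PySem.Set.mem_ofList]
  have hperm : (S.flatMap (fun v => List.replicate (d.count v) v)).Perm d := by
    refine List.perm_iff_count.mpr ?_
    intro a
    rw [count_flat d S hSnd a]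
    by_cases ha : a ∈ S
    · simp [ha]
    · have : a ∉ d := fun h => ha ((hSmem a).mpr h)
      simp [ha, List.count_eq_zero.mpr this]
  have hpw : (S.flatMap (fun v => List.replicate (d.count v) v)).Pairwise (· ≤ ·) :=
    flat_pairwise d S (PySem.List.sorted_ofList_pairwise_lt d)
  exact PySem.List.sorted_id_eq_of_perm_of_pairwise _ _ hperm hpw

lemma B_eq (d : List Int) :
    Greedy_alt d = emitSeq d
      ((PySem.List.sorted (PySem.Set.ofList d) (fun x => x) false).flatMap
        (fun v => List.replicate (d.count v) v)) 0 := by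
  unfold Greedy_alt
  simp only [keys_eq, bucket_eq]
  have := main_fold d (PySem.List.sorted (PySem.Set.ofList d) (fun x => x) false) [] 0
    (fun v hv => (PySem.Set.mem_ofList _ _).mp ((PySem.List.mem_sorted _ _ _ _).mp hv))
  rw [show ((0 : Nat) : Int) = 0 from rfl, List.nil_append] at this
  exact this

-- ===== VERDICT (by name: the statement is the Claim_ definition above) =====
theorem Greedy_spec : Claim_equal_Greedy := by
  intro d _ hpre
  unfold Spec_Greedy
  rw [A_eq, B_eq, sorted_eq_flat]
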